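-- pv_equiv track=rewrite | github.com/jkozelski/stemscribe | backend/stem_chord_detector.py | map_to_v8_class
-- ===== SOURCE A (Python) =====
-- ENHARMONIC = {
--     'Db': 'C#', 'Eb': 'D#', 'Fb': 'E', 'Gb': 'F#',
--     'Ab': 'G#', 'Bb': 'A#', 'Cb': 'B',
-- }
--
-- def map_to_v8_class(chord_name: str, v8_classes: list) -> str:
--     """Map a detected chord to the closest V8 class name."""
--     if chord_name in v8_classes:
--         return chord_name
--     # 'Cm7' in design -> 'Cmin7' in V8
--     # Try min/min7/min6 conversions
--     conversions = [
--         ('m9', 'min9'), ('m7', 'min7'), ('m6', 'min6'), ('m', 'min'),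
--     ]
--     for src, dst in conversions:
--         if chord_name.endswith(src) and not chord_name.endswith('dim' + src):
--             alt = chord_name[:-len(src)] + dst
--             if alt in v8_classes:
--                 return alt
--
--     # Try without inversion
--     base = chord_name.split('/')[0]
--     if base in v8_classes:
--         return base
--
--     # Try enharmonic
--     for old, new in ENHARMONIC.items():
--         if chord_name.startswith(old):
--             alt = new + chord_name[len(old):]
--             if alt in v8_classes:
--                 return alt
--
--     # Simplify extensions (for types not in V8 vocabulary)
--     simplifications = [
--         ('madd9', 'min'), ('add9', ''), ('min9', 'min7'),
--         ('maj9', 'maj7'), ('9', '7'), ('7sus4', 'sus4'), ('5', ''),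
--     ]
--     for src, dst in simplifications:
--         if src in chord_name:
--             simplified = chord_name.replace(src, dst)
--             if simplified in v8_classes:
--                 return simplified
--
--     return chord_name
-- ===== SOURCE B (Python) =====
-- ENHARMONIC = {
--     'Db': 'C#', 'Eb': 'D#', 'Fb': 'E', 'Gb': 'F#',
--     'Ab': 'G#', 'Bb': 'A#', 'Cb': 'B',
-- }
--
-- CONVERSIONS = [('m9', 'min9'), ('m7', 'min7'), ('m6', 'min6'), ('m', 'min')]
-- SIMPLIFICATIONS = [
--     ('madd9', 'min'), ('add9', ''), ('min9', 'min7'),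
--     ('maj9', 'maj7'), ('9', '7'), ('7sus4', 'sus4'), ('5', ''),
-- ]
--
--
-- def _candidates(chord_name):
--     """The ranked list of acceptable class names for chord_name, best first."""
--     cands = [chord_name]
--     cands += [chord_name[:-len(src)] + dst for src, dst in CONVERSIONS
--               if chord_name.endswith(src) and not chord_name.endswith('dim' + src)]
--     cands.append(chord_name.split('/')[0])
--     cands += [new + chord_name[len(old):] for old, new in ENHARMONIC.items()
--               if chord_name.startswith(old)]
--     cands += [chord_name.replace(src, dst) for src, dst in SIMPLIFICATIONS
--               if src in chord_name]
--     return cands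
--
--
-- def map_to_v8_class(chord_name: str, v8_classes: list) -> str:
--     """Map a detected chord to the closest V8 class name.
--
--     Inverted scan: score each available class by its rank in the candidate
--     list and return the best-ranked (argmin) one; fall back to chord_name.
--     """
--     cands = _candidates(chord_name)
--     best_i, best = None, chord_name
--     for cls in v8_classes:
--         if cls in cands:
--             i = cands.index(cls)
--             if best_i is None or i < best_i:
--                 best_i, best = i, cls
--     return best
-- ===== Notes on version B (the rewrite author's own statement) =====
-- stated objective: alternative
-- what changed: B inverts A's scan: instead of testing candidate after candidate for membership in v8_classes with early returns, it builds the ranked candidate list once and makes a single argmin pass over v8_classes, keeping the available class with the lowest candidate rank, which equals A's first-match result.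
import Mathlib
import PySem

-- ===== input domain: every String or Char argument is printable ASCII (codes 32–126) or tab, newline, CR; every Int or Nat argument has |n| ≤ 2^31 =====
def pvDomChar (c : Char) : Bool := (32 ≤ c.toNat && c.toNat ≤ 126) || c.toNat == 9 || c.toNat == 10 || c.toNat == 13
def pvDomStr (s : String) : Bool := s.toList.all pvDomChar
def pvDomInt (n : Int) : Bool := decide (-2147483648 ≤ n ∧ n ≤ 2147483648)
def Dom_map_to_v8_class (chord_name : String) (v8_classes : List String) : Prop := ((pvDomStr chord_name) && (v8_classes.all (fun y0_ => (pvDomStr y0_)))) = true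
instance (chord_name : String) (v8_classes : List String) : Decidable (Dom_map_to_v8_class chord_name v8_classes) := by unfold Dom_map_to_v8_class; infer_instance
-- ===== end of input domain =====

-- B inverts A's scan: it ranks the acceptable names once and then makes a single argmin pass
-- over v8_classes, scoring each available class by its rank (objective: alternative).

-- shared literal tables (A's `conversions`, ENHARMONIC, `simplifications`)
def pvConversions : List (String × String) :=
  [("m9", "min9"), ("m7", "min7"), ("m6", "min6"), ("m", "min")]
def pvEnharmonic : List (String × String) :=
  [("Db", "C#"), ("Eb", "D#"), ("Fb", "E"), ("Gb", "F#"), ("Ab", "G#"), ("Bb", "A#"), ("Cb", "B")]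
def pvSimplifications : List (String × String) :=
  [("madd9", "min"), ("add9", ""), ("min9", "min7"), ("maj9", "maj7"), ("9", "7"), ("7sus4", "sus4"), ("5", "")]

-- ===== PORT A =====
-- A's `for src, dst in conversions: …` loop with its in-loop early return
def pvConvLoopA (chord_name : String) (v8_classes : List String) : List (String × String) → Option String
  | [] => none
  | (src, dst) :: rest =>
    if PySem.Str.endswith chord_name src && !(PySem.Str.endswith chord_name ("dim" ++ src)) then
      let alt := PySem.Str.slice chord_name none (some (-(PySem.Str.len src))) ++ dst
      if v8_classes.contains alt then some alt else pvConvLoopA chord_name v8_classes rest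
    else pvConvLoopA chord_name v8_classes rest

-- A's `for old, new in ENHARMONIC.items(): …` loop
def pvEnhLoopA (chord_name : String) (v8_classes : List String) : List (String × String) → Option String
  | [] => none
  | (old, new) :: rest =>
    if PySem.Str.startswith chord_name old then
      let alt := new ++ PySem.Str.slice chord_name (some (PySem.Str.len old)) none
      if v8_classes.contains alt then some alt else pvEnhLoopA chord_name v8_classes rest
    else pvEnhLoopA chord_name v8_classes rest

-- A's `for src, dst in simplifications: …` loop
def pvSimpLoopA (chord_name : String) (v8_classes : List String) : List (String × String) → Option String
  | [] => none
  | (src, dst) :: rest =>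
    if PySem.Str.isIn src chord_name then
      let simplified := PySem.Str.replace chord_name src dst
      if v8_classes.contains simplified then some simplified else pvSimpLoopA chord_name v8_classes rest
    else pvSimpLoopA chord_name v8_classes rest

def map_to_v8_class (chord_name : String) (v8_classes : List String) : String :=
  if v8_classes.contains chord_name then chord_name
  else
    match pvConvLoopA chord_name v8_classes pvConversions with
    | some alt => alt
    | none =>
      let base := (((PySem.Str.split? chord_name "/").getD []).headD "")
      if v8_classes.contains base then base
      else
        match pvEnhLoopA chord_name v8_classes pvEnharmonic with
        | some alt => alt
        | none =>
          match pvSimpLoopA chord_name v8_classes pvSimplifications with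
          | some simplified => simplified
          | none => chord_name

-- ===== PORT B =====
-- Source B's `_candidates`: the ranked list of acceptable class names, best first
def pvCandidates (chord_name : String) : List String :=
  chord_name ::
    pvConversions.filterMap (fun p =>
      if PySem.Str.endswith chord_name p.1 && !(PySem.Str.endswith chord_name ("dim" ++ p.1)) then
        some (PySem.Str.slice chord_name none (some (-(PySem.Str.len p.1))) ++ p.2)
      else none)
  ++ [(((PySem.Str.split? chord_name "/").getD []).headD "")]
  ++ pvEnharmonic.filterMap (fun p =>
      if PySem.Str.startswith chord_name p.1 then
        some (p.2 ++ PySem.Str.slice chord_name (some (PySem.Str.len p.1)) none)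
      else none)
  ++ pvSimplifications.filterMap (fun p =>
      if PySem.Str.isIn p.1 chord_name then
        some (PySem.Str.replace chord_name p.1 p.2)
      else none)

-- Source B's argmin loop: `for cls in v8_classes: if cls in cands: i = cands.index(cls); …`
-- (membership test + .index ported together as PySem.List.index?; acc = (best_i, best))
def pvBestLoop (cands : List String) : List String → Option Nat × String → Option Nat × String
  | [], acc => acc
  | cls :: rest, acc =>
    match PySem.List.index? cands cls with
    | none => pvBestLoop cands rest acc
    | some i =>
      match acc.1 with
      | none => pvBestLoop cands rest (some i, cls)
      | some j => if i < j then pvBestLoop cands rest (some i, cls) else pvBestLoop cands rest acc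

def map_to_v8_class_alt (chord_name : String) (v8_classes : List String) : String :=
  (pvBestLoop (pvCandidates chord_name) v8_classes (none, chord_name)).2

-- ===== PRECONDITION & SPEC =====
def Spec_map_to_v8_class (chord_name : String) (v8_classes : List String) (out : String) : Prop := out = map_to_v8_class_alt chord_name v8_classes
instance (chord_name : String) (v8_classes : List String) (out : String) : Decidable (Spec_map_to_v8_class chord_name v8_classes out) := by unfold Spec_map_to_v8_class; infer_instance

-- ===== CLAIM (what is proved, stated in full; the proofs are below) =====
def Claim_equal_map_to_v8_class : Prop := ∀ (chord_name : String) (v8_classes : List String), Dom_map_to_v8_class chord_name v8_classes → Spec_map_to_v8_class chord_name v8_classes (map_to_v8_class chord_name v8_classes)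

-- ===== LEMMAS AND PROOFS =====

-- each of A's three scan loops is find? over the corresponding filterMap stage of B's candidate list
theorem pvConvLoopA_eq (c : String) (v8 : List String) (ps : List (String × String)) :
    pvConvLoopA c v8 ps =
      (ps.filterMap (fun p =>
        if PySem.Str.endswith c p.1 && !(PySem.Str.endswith c ("dim" ++ p.1)) then
          some (PySem.Str.slice c none (some (-(PySem.Str.len p.1))) ++ p.2)
        else none)).find? (fun x => v8.contains x) := by
  induction ps with
  | nil => rfl
  | cons p rest ih =>
    obtain ⟨src, dst⟩ := p
    simp only [pvConvLoopA, List.filterMap_cons]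
    split_ifs with h1 h2
    · simp only [List.find?_cons_of_pos h2]
    · rw [List.find?_cons_of_neg h2]; exact ih
    · exact ih

theorem pvEnhLoopA_eq (c : String) (v8 : List String) (ps : List (String × String)) :
    pvEnhLoopA c v8 ps =
      (ps.filterMap (fun p =>
        if PySem.Str.startswith c p.1 then
          some (p.2 ++ PySem.Str.slice c (some (PySem.Str.len p.1)) none)
        else none)).find? (fun x => v8.contains x) := by
  induction ps with
  | nil => rfl
  | cons p rest ih =>
    obtain ⟨old, nw⟩ := p
    simp only [pvEnhLoopA, List.filterMap_cons]
    split_ifs with h1 h2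
    · simp only [List.find?_cons_of_pos h2]
    · rw [List.find?_cons_of_neg h2]; exact ih
    · exact ih

theorem pvSimpLoopA_eq (c : String) (v8 : List String) (ps : List (String × String)) :
    pvSimpLoopA c v8 ps =
      (ps.filterMap (fun p =>
        if PySem.Str.isIn p.1 c then
          some (PySem.Str.replace c p.1 p.2)
        else none)).find? (fun x => v8.contains x) := by
  induction ps with
  | nil => rfl
  | cons p rest ih =>
    obtain ⟨src, dst⟩ := p
    simp only [pvSimpLoopA, List.filterMap_cons]
    split_ifs with h1 h2
    · simp only [List.find?_cons_of_pos h2]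
    · rw [List.find?_cons_of_neg h2]; exact ih
    · exact ih

-- A's early-return chain is first-match over B's candidate list
theorem mapA_eq_find (c : String) (v8 : List String) :
    map_to_v8_class c v8 =
      (((pvCandidates c).find? (fun x => v8.contains x)).getD c) := by
  unfold map_to_v8_class pvCandidates
  simp only [List.find?_cons, List.find?_append,
    ← pvConvLoopA_eq, ← pvEnhLoopA_eq, ← pvSimpLoopA_eq]
  cases v8.contains c with
  | true => rfl
  | false =>
    cases pvConvLoopA c v8 pvConversions with
    | some a => rfl
    | none =>
      cases v8.contains (((PySem.Str.split? c "/").getD []).headD "") with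
      | true => rfl
      | false =>
        cases pvEnhLoopA c v8 pvEnharmonic with
        | some a => rfl
        | none =>
          cases pvSimpLoopA c v8 pvSimplifications with
          | some simplified => rfl
          | none => rfl

-- first occurrence: the index? of an element seen at position i is at most i
theorem index?_le_of_getElem (cands : List String) (i : Nat) (hi : i < cands.length) :
    ∃ k, PySem.List.index? cands cands[i] = some k ∧ k ≤ i := by
  have hmem : cands[i] ∈ cands := List.getElem_mem hi
  have hs : (PySem.List.index? cands cands[i]).isSome := by
    rw [PySem.List.index?_isSome_iff]; exact hmem
  obtain ⟨k, hk⟩ := Option.isSome_iff_exists.mp hs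
  refine ⟨k, hk, ?_⟩
  obtain ⟨hkl, hek, hmin⟩ := PySem.List.getElem_of_index?_eq_some hk
  by_contra h
  exact hmin i (by omega) rfl

-- argmin loop, started with a valid best: the result is the best-ranked hit (or the start value)
theorem pvBestLoop_some (cands : List String) :
    ∀ (v8 : List String) (j : Nat) (b : String),
    PySem.List.index? cands b = some j →
    ∃ j' b', pvBestLoop cands v8 (some j, b) = (some j', b')
      ∧ PySem.List.index? cands b' = some j'
      ∧ j' ≤ j
      ∧ (∀ cls ∈ v8, ∀ i, PySem.List.index? cands cls = some i → j' ≤ i)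
      ∧ (b' = b ∨ b' ∈ v8) := by
  intro v8
  induction v8 with
  | nil =>
    intro j b hb
    exact ⟨j, b, rfl, hb, le_refl _, by simp, Or.inl rfl⟩
  | cons cls rest ih =>
    intro j b hb
    simp only [pvBestLoop]
    cases hidx : PySem.List.index? cands cls with
    | none =>
      obtain ⟨j', b', hres, hb', hle, hmin, hor⟩ := ih j b hb
      refine ⟨j', b', hres, hb', hle, ?_, ?_⟩
      · intro x hx i hxi
        rcases List.mem_cons.mp hx with h | h
        · subst h; rw [hidx] at hxi; cases hxi
        · exact hmin x h i hxi
      · rcases hor with h | h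
        · exact Or.inl h
        · exact Or.inr (List.mem_cons_of_mem _ h)
    | some i =>
      by_cases hlt : i < j
      · simp only [if_pos hlt]
        obtain ⟨j', b', hres, hb', hle, hmin, hor⟩ := ih i cls hidx
        refine ⟨j', b', hres, hb', by omega, ?_, ?_⟩
        · intro x hx k hxk
          rcases List.mem_cons.mp hx with h | h
          · subst h; rw [hidx] at hxk; injection hxk with h'; omega
          · exact hmin x h k hxk
        · rcases hor with h | h
          · exact Or.inr (by simp [h])
          · exact Or.inr (List.mem_cons_of_mem _ h)
      · simp only [if_neg hlt]
        obtain ⟨j', b', hres, hb', hle, hmin, hor⟩ := ih j b hb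
        refine ⟨j', b', hres, hb', hle, ?_, ?_⟩
        · intro x hx k hxk
          rcases List.mem_cons.mp hx with h | h
          · subst h; rw [hidx] at hxk; injection hxk with h'; omega
          · exact hmin x h k hxk
        · rcases hor with h | h
          · exact Or.inl h
          · exact Or.inr (List.mem_cons_of_mem _ h)

-- argmin loop from scratch: either nothing in v8 ranks, or the result is the best-ranked hit
theorem pvBestLoop_none (cands : List String) :
    ∀ (v8 : List String) (d : String),
    (pvBestLoop cands v8 (none, d) = (none, d) ∧ ∀ cls ∈ v8, PySem.List.index? cands cls = none)
    ∨ (∃ j' b', pvBestLoop cands v8 (none, d) = (some j', b')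
        ∧ PySem.List.index? cands b' = some j' ∧ b' ∈ v8
        ∧ ∀ cls ∈ v8, ∀ i, PySem.List.index? cands cls = some i → j' ≤ i) := by
  intro v8
  induction v8 with
  | nil => intro d; exact Or.inl ⟨rfl, by simp⟩
  | cons cls rest ih =>
    intro d
    simp only [pvBestLoop]
    cases hidx : PySem.List.index? cands cls with
    | none =>
      rcases ih d with ⟨hres, hall⟩ | ⟨j', b', hres, hb', hmem, hmin⟩
      · refine Or.inl ⟨hres, ?_⟩
        intro x hx
        rcases List.mem_cons.mp hx with h | h
        · subst h; exact hidx
        · exact hall x h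
      · refine Or.inr ⟨j', b', hres, hb', List.mem_cons_of_mem _ hmem, ?_⟩
        intro x hx i hxi
        rcases List.mem_cons.mp hx with h | h
        · subst h; rw [hidx] at hxi; cases hxi
        · exact hmin x h i hxi
    | some i =>
      obtain ⟨j', b', hres, hb', hle, hmin, hor⟩ := pvBestLoop_some cands rest i cls hidx
      refine Or.inr ⟨j', b', hres, hb', ?_, ?_⟩
      · rcases hor with h | h
        · exact by simp [h]
        · exact List.mem_cons_of_mem _ h
      · intro x hx k hxk
        rcases List.mem_cons.mp hx with h | h
        · subst h; rw [hidx] at hxk; injection hxk with h'; omega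
        · exact hmin x h k hxk

-- the argmin over v8 of the candidate rank IS the first candidate present in v8
theorem pvBestLoop_eq_find (cands v8 : List String) (d : String) :
    (pvBestLoop cands v8 (none, d)).2 =
      ((cands.find? (fun x => v8.contains x)).getD d) := by
  rcases pvBestLoop_none cands v8 d with ⟨hres, hall⟩ | ⟨j', b', hres, hb', hmem, hmin⟩
  · rw [hres]
    cases hf : cands.find? (fun x => v8.contains x) with
    | none => rfl
    | some x =>
      have hx : x ∈ v8 := by
        have := List.find?_some hf
        simpa using this
      have hxc : x ∈ cands := List.mem_of_find?_eq_some hf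
      have := hall x hx
      rw [PySem.List.index?_eq_none_iff] at this
      exact absurd hxc this
  · rw [hres]
    have hfind : cands.find? (fun x => v8.contains x) = some b' := by
      rw [List.find?_eq_some_iff_getElem]
      obtain ⟨hjl, hget, hfirst⟩ := PySem.List.getElem_of_index?_eq_some hb'
      refine ⟨by simpa using hmem, j', hjl, hget, ?_⟩
      intro jj hjj
      simp only [Bool.not_eq_eq_eq_not, Bool.not_true]
      by_contra hcon
      have hinv8 : cands[jj] ∈ v8 := by
        simp only [Bool.not_eq_false] at hcon
        simpa using hcon
      obtain ⟨k, hk, hkle⟩ := index?_le_of_getElem cands jj (by omega)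
      have := hmin _ hinv8 k hk
      omega
    rw [hfind]
    rfl

-- ===== VERDICT (by name: the statement is the Claim_ definition above) =====
theorem map_to_v8_class_spec : Claim_equal_map_to_v8_class := by
  intro c v8 _
  unfold Spec_map_to_v8_class map_to_v8_class_alt
  rw [mapA_eq_find, pvBestLoop_eq_find]
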